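-- pv_equiv track=rewrite | github.com/IES-Rafael-Alberti/1dam-ejercicios-u2-agadrian | src/ej2_30.py | buscarLetra
-- ===== SOURCE A (Python) =====
-- def buscarLetra(frase,letra):
--     '''
--     Se le pasa una frase y una letra como parametro. Busca si la letra está en la frase
--
--     Retorna:
--             str, del mensaje que informa si esta o no
--     '''
--     indice = 0
--     pos = ""
--     frase = frase.replace(" ", "")
--
--     for i in frase:
--         if i == letra:
--             pos += "Hay coincidencia en la posicion: " + str(indice) + " --> " + str(i) + "\nFinalizando..."
--
--             break
--         else:
--             pos +="No hay coincidencia en la posicion: " + str(indice) + " --> " + str(i) + "\n"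
--
--         indice += 1
--
--     return pos
-- ===== SOURCE B (Python) =====
-- def buscarLetra(frase, letra):
--     frase = frase.replace(" ", "")
--     idx = next((k for k, c in enumerate(frase) if c == letra), None)
--     if idx is None:
--         return "".join("No hay coincidencia en la posicion: %d --> %s\n" % (k, c)
--                        for k, c in enumerate(frase))
--     pre = "".join("No hay coincidencia en la posicion: %d --> %s\n" % (k, c)
--                   for k, c in enumerate(frase[:idx]))
--     return pre + "Hay coincidencia en la posicion: %d --> %s\nFinalizando..." % (idx, frase[idx])
-- ===== Notes on version B (the rewrite author's own statement) =====
-- stated objective: alternative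
-- what changed: B first locates the first matching position with a per-character search, then formats the report in a separate pass (join over the prefix plus one hit line), instead of A's single early-breaking accumulation loop.
import Mathlib
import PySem

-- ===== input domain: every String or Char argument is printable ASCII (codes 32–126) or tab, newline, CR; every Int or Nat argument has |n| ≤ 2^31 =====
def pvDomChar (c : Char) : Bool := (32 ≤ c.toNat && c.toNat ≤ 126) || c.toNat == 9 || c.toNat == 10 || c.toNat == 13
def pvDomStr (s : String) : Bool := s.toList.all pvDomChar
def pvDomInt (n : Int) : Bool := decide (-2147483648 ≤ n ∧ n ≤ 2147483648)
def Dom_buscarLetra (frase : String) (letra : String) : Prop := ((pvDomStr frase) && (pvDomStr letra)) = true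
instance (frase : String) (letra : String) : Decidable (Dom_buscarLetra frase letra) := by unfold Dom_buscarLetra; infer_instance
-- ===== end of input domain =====

-- B separates locating the first hit (findIdx?) from formatting the report (join over the
-- miss-prefix plus one hit line), instead of A's single early-breaking accumulation loop;
-- same cost, different decomposition ("alternative").

-- ===== PORT A =====
def pvMissA (indice : Int) (c : Char) : List Char :=
  "No hay coincidencia en la posicion: ".toList ++ PySem.Int.toChars indice
    ++ " --> ".toList ++ [c] ++ "\n".toList

def pvHitA (indice : Int) (c : Char) : List Char :=
  "Hay coincidencia en la posicion: ".toList ++ PySem.Int.toChars indice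
    ++ " --> ".toList ++ [c] ++ "\nFinalizando...".toList

-- the for-loop with early break, as structural recursion over the same (indice, pos) state
def pvLoopA (letra : String) : List Char → Int → List Char → List Char
  | [], _, pos => pos
  | c :: rest, indice, pos =>
    if [c] = letra.toList then pos ++ pvHitA indice c
    else pvLoopA letra rest (indice + 1) (pos ++ pvMissA indice c)

def buscarLetra (frase : String) (letra : String) : String :=
  String.ofList (pvLoopA letra (PySem.Chars.replace frase.toList " ".toList "".toList) 0 [])

-- ===== PORT B =====
def pvMissB (k : Nat) (c : Char) : List Char :=
  "No hay coincidencia en la posicion: ".toList ++ PySem.Int.toChars (k : Int)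
    ++ " --> ".toList ++ [c] ++ "\n".toList

def buscarLetra_alt (frase : String) (letra : String) : String :=
  let cs := PySem.Chars.replace frase.toList " ".toList "".toList
  match cs.findIdx? (fun c => decide ([c] = letra.toList)) with
  | none => String.ofList ((cs.zipIdx.map (fun p => pvMissB p.2 p.1)).flatten)
  | some k =>
      String.ofList (((cs.take k).zipIdx.map (fun p => pvMissB p.2 p.1)).flatten
        ++ "Hay coincidencia en la posicion: ".toList ++ PySem.Int.toChars (k : Int)
        ++ " --> ".toList ++ [cs[k]!] ++ "\nFinalizando...".toList)

-- ===== PRECONDITION & SPEC =====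
def Spec_buscarLetra (frase : String) (letra : String) (out : String) : Prop := out = buscarLetra_alt frase letra
instance (frase : String) (letra : String) (out : String) : Decidable (Spec_buscarLetra frase letra out) := by unfold Spec_buscarLetra; infer_instance

-- ===== CLAIM (what is proved, stated in full; the proofs are below) =====
def Claim_equal_buscarLetra : Prop := ∀ (frase : String) (letra : String), Dom_buscarLetra frase letra → Spec_buscarLetra frase letra (buscarLetra frase letra)

-- ===== LEMMAS AND PROOFS =====

-- B's result body, generalized over the starting index offset j
def pvRender (letra : String) (cs : List Char) (j : Nat) : List Char :=
  match cs.findIdx? (fun c => decide ([c] = letra.toList)) with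
  | none => ((cs.zipIdx j).map (fun p => pvMissB p.2 p.1)).flatten
  | some k =>
      ((cs.take k).zipIdx j).map (fun p => pvMissB p.2 p.1) |>.flatten
        |> (· ++ pvHitA ((j + k : Nat) : Int) cs[k]!)

theorem pvLoopA_render (letra : String) (cs : List Char) (j : Nat) (pos : List Char) :
    pvLoopA letra cs (j : Int) pos = pos ++ pvRender letra cs j := by
  induction cs generalizing j pos with
  | nil => simp [pvLoopA, pvRender]
  | cons c rest ih =>
    by_cases h : [c] = letra.toList
    · have hf : (c :: rest).findIdx? (fun c => decide ([c] = letra.toList)) = some 0 := by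
        simp [List.findIdx?_cons, h]
      simp [pvLoopA, pvRender, h, hf, pvHitA]
    · have h1 : ((j : Int) + 1) = ((j + 1 : Nat) : Int) := by push_cast; ring
      simp only [pvLoopA, if_neg h, h1, ih]
      simp only [pvRender, List.findIdx?_cons, h, decide_false,
        Bool.false_eq_true, ite_false]
      cases hf : rest.findIdx? (fun c => decide ([c] = letra.toList)) with
      | none => simp [List.zipIdx_cons, pvMissA, pvMissB, List.append_assoc]
      | some k =>
        simp [List.zipIdx_cons, pvMissA, pvMissB, List.append_assoc]
        congr 1
        omega

-- ===== VERDICT (by name: the statement is the Claim_ definition above) =====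
theorem buscarLetra_spec : Claim_equal_buscarLetra := by
  intro frase letra _
  unfold Spec_buscarLetra buscarLetra buscarLetra_alt
  generalize PySem.Chars.replace frase.toList " ".toList "".toList = cs
  have := pvLoopA_render letra cs 0 []
  simp only [Nat.cast_zero, List.nil_append] at this
  rw [this]
  cases hf : cs.findIdx? (fun c => decide ([c] = letra.toList)) with
  | none => simp [pvRender, hf]
  | some k => simp [pvRender, hf, pvHitA]
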